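-- pv_equiv track=rewrite | github.com/ai-kmu/etc | algorithm/2019/191029/seongsil.py | solution
-- ===== SOURCE A (Python) =====
-- def solution(A, B):
--     answer = 0
--
--     sort_A = sorted(A)
--     sort_B = sorted(B)
--
--     for i in sort_A:
--         for j in sort_B:
--             if i < j:  #B가 이기면
--                 answer += 1
--                 sort_B.remove(j)
--                 break
--     return answer
-- ===== SOURCE B (Python) =====
-- def solution(A, B):
--     sort_A = sorted(A)
--     sort_B = sorted(B)
--     answer = 0
--     i = 0
--     j = 0
--     while i < len(sort_A) and j < len(sort_B):
--         if sort_A[i] < sort_B[j]: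
--             answer += 1
--             i += 1
--         j += 1
--     return answer
-- ===== Notes on version B (the rewrite author's own statement) =====
-- stated objective: faster
-- what changed: Replaced the per-element inner scan and list.remove over the remaining B list with a single two-pointer sweep over both sorted arrays.
import Mathlib
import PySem

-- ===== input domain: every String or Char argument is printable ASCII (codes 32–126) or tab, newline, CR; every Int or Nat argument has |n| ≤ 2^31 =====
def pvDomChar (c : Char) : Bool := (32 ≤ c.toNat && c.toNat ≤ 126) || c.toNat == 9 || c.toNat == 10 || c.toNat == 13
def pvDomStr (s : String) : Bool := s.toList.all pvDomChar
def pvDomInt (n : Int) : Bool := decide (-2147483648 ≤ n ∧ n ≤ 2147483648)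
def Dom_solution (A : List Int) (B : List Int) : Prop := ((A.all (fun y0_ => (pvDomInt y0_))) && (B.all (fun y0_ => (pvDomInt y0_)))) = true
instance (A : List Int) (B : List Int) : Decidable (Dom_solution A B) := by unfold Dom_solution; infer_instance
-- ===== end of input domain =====

-- B replaces A's quadratic scan-and-remove greedy with a two-pointer sweep over both sorted lists (faster, asymptotic).


-- ===== PORT A =====
-- one iteration of A's outer loop: scan sort_B for the first j with i < j, remove it, bump answer
def stepA (st : Int × List Int) (i : Int) : Int × List Int :=
  match List.find? (fun j => decide (i < j)) st.2 with
  | none => st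
  | some j => (st.1 + 1, match PySem.List.remove? st.2 j with
                         | some l => l
                         | none => st.2)   -- unreachable: j was found in st.2

def solution (A : List Int) (B : List Int) : Int :=
  let sortA := PySem.List.sorted A (fun x => x)
  let sortB := PySem.List.sorted B (fun x => x)
  (sortA.foldl stepA ((0 : Int), sortB)).1

-- ===== PORT B =====
-- the while loop of Source B: advance over both sorted lists, matching when sa[i] < sb[j]
def twoPtr : List Int → List Int → Int
  | _, [] => 0
  | [], _ :: _ => 0
  | a :: as, b :: bs => if a < b then 1 + twoPtr as bs else twoPtr (a :: as) bs
termination_by as bs => (as.length, bs.length)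

def solution_alt (A : List Int) (B : List Int) : Int :=
  twoPtr (PySem.List.sorted A (fun x => x)) (PySem.List.sorted B (fun x => x))

-- ===== PRECONDITION & SPEC =====
def Spec_solution (A : List Int) (B : List Int) (out : Int) : Prop := out = solution_alt A B
instance (A : List Int) (B : List Int) (out : Int) : Decidable (Spec_solution A B out) := by unfold Spec_solution; infer_instance

-- ===== CLAIM (what is proved, stated in full; the proofs are below) =====
def Claim_equal_solution : Prop := ∀ (A : List Int) (B : List Int), Dom_solution A B → Spec_solution A B (solution A B)

-- ===== LEMMAS AND PROOFS =====

-- A's answer counter, separated from the fold state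
def countA : List Int → List Int → Int
  | [], _ => 0
  | a :: as, bs =>
    match List.find? (fun j => decide (a < j)) bs with
    | none => countA as bs
    | some j => 1 + countA as (match PySem.List.remove? bs j with
                               | some l => l
                               | none => bs)

theorem foldl_stepA (as : List Int) : ∀ (c : Int) (bs : List Int),
    (as.foldl stepA (c, bs)).1 = c + countA as bs := by
  induction as with
  | nil => intro c bs; simp [countA]
  | cons a as ih =>
    intro c bs
    simp only [List.foldl_cons, countA]
    cases h : List.find? (fun j => decide (a < j)) bs with
    | none => simp [stepA, h, ih]
    | some j =>
      simp only [stepA, h, ih]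
      cases PySem.List.remove? bs j <;> simp <;> ring

theorem countA_zero (as : List Int) : ∀ (l : List Int),
    (∀ x ∈ l, ∀ a ∈ as, x ≤ a) → countA as l = 0 := by
  induction as with
  | nil => intro l _; simp [countA]
  | cons a as ih =>
    intro l hl
    have hfind : List.find? (fun j => decide (a < j)) l = none := by
      rw [List.find?_eq_none]
      intro x hx
      simpa using not_lt.2 (hl x hx a (by simp))
    simp only [countA, hfind]
    exact ih l (fun x hx a' ha' => hl x hx a' (by simp [ha']))

theorem countA_eq_twoPtr (bs : List Int) : ∀ (as l : List Int),
    (∀ x ∈ l, ∀ a ∈ as, x ≤ a) → as.Pairwise (· ≤ ·) →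
    countA as (l ++ bs) = twoPtr as bs := by
  induction bs with
  | nil =>
    intro as l hl _
    rw [List.append_nil, countA_zero as l hl]
    cases as <;> simp [twoPtr]
  | cons b bs ih =>
    intro as l hl hsorted
    cases as with
    | nil => simp [countA, twoPtr]
    | cons a as =>
      by_cases hab : a < b
      · -- match: first j with a < j in l ++ b :: bs is b
        have hln : List.find? (fun j => decide (a < j)) l = none := by
          rw [List.find?_eq_none]
          intro x hx
          simpa using not_lt.2 (hl x hx a (by simp))
        have hfind : List.find? (fun j => decide (a < j)) (l ++ b :: bs) = some b := by
          rw [List.find?_append, hln]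
          simp [hab]
        have hmem : b ∈ l ++ b :: bs := by simp
        have hrem : PySem.List.remove? (l ++ b :: bs) b = some ((l ++ b :: bs).erase b) :=
          PySem.List.remove?_eq_some_erase _ b hmem
        have hbnl : b ∉ l := by
          intro hbl
          exact absurd hab (not_lt.2 (hl b hbl a (by simp)))
        have herase : (l ++ b :: bs).erase b = l ++ bs := by
          rw [List.erase_append_right _ hbnl, List.erase_cons_head]
        simp only [countA, hfind, hrem, herase]
        have ihap : countA as (l ++ bs) = twoPtr as bs := by
          refine ih as l (fun x hx a' ha' => hl x hx a' (by simp [ha'])) hsorted.of_cons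
        rw [ihap]
        simp [twoPtr, hab]
      · -- skip: b ≤ a, b joins the skipped prefix
        have hba : b ≤ a := not_lt.1 hab
        have hstep : countA (a :: as) (l ++ b :: bs) = twoPtr (a :: as) bs := by
          have : l ++ b :: bs = (l ++ [b]) ++ bs := by simp
          rw [this]
          refine ih (a :: as) (l ++ [b]) ?_ hsorted
          intro x hx a' ha'
          rcases List.mem_append.1 hx with hx | hx
          · exact hl x hx a' ha'
          · have hx : x = b := by simpa using hx
            subst hx
            rcases List.mem_cons.1 ha' with h | h
            · exact h ▸ hba
            · exact le_trans hba (List.rel_of_pairwise_cons hsorted h)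
        rw [hstep]
        simp [twoPtr, hab]

-- ===== VERDICT (by name: the statement is the Claim_ definition above) =====
theorem solution_spec : Claim_equal_solution := by
  intro A B _
  show solution A B = solution_alt A B
  unfold solution solution_alt
  rw [foldl_stepA]
  have h := countA_eq_twoPtr (PySem.List.sorted B (fun x => x))
      (PySem.List.sorted A (fun x => x)) [] (by simp)
      (by simpa using PySem.List.sorted_pairwise A (fun x => x))
  simpa using h
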